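-- pv_equiv track=rewrite | github.com/lavr2004/GeoMapJobScraper | bin/parsers/pracujpl/pracujpl_parser.py | parse_lastword_from_url_fc
-- ===== SOURCE A (Python) =====
-- def parse_lastword_from_url_fc(restofurl_str):
--     #take one last word instead
--     r = ""
--     lastindex = len(restofurl_str) - 1
--     startofstringfound = False
--     for i in range(len(restofurl_str) - 1, -1, -1):
--         if startofstringfound:
--             if restofurl_str[i] == "-":
--                 break
--             else:
--                 r += restofurl_str[i]
--                 lastindex = i
--         else:
--             if restofurl_str[i] == "-":
--                 r += " "
--             else:
--                 r += restofurl_str[i]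
--             lastindex = i
--             startofstringfound = True
--
--     restofurl_str = restofurl_str[:lastindex]
--     if r:
--         r = r.strip()
--         r = r[::-1]
--
--     return r, restofurl_str
-- ===== SOURCE B (Python) =====
-- def parse_lastword_from_url_fc(restofurl_str):
--     s = restofurl_str
--     idx = s.rfind("-", 0, len(s) - 1) + 1
--     end = len(s) - 1 if s.endswith("-") else len(s)
--     return s[idx:end].strip(), s[:idx]
-- ===== Notes on version B (the rewrite author's own statement) =====
-- stated objective: simpler
-- what changed: Replaced the backward state-machine scan (explicit reverse loop with a startofstringfound flag, char-by-char reversed-string build, final strip+reverse) by one rfind of the last hyphen before the final character plus two slices and a strip.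
import Mathlib
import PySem

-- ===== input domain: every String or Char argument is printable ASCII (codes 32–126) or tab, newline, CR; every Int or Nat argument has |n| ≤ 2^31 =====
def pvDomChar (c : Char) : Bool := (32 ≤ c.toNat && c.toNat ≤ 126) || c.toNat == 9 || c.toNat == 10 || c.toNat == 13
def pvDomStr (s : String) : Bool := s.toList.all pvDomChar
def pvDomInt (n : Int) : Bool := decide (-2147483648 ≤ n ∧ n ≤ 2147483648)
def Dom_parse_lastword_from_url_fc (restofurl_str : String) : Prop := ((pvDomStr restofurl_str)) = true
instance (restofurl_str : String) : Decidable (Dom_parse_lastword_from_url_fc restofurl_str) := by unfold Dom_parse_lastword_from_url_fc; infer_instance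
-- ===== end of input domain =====

-- B replaces A's backward character-scan state machine by an index computation
-- (rfind of the last hyphen before the final character, then two slices); objective: simpler.

-- ===== PORT A =====
-- the for-loop over range(len(s)-1, -1, -1) with state (r, lastindex, startofstringfound);
-- returning early on a hyphen transliterates the 'break'
def pvALoop (s : List Char) : Nat → List Char → Int → Bool → List Char × Int
  | 0, r, li, _ => (r, li)
  | k+1, r, li, found =>
    let c := (PySem.List.pyGet? s ((k : Nat) : Int)).getD ' '
    if found then
      if c = '-' then (r, li)
      else pvALoop s k (r ++ [c]) (k : Int) found
    else
      pvALoop s k (r ++ [if c = '-' then ' ' else c]) (k : Int) true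

def parse_lastword_from_url_fc (restofurl_str : String) : String × String :=
  let cs := restofurl_str.toList
  let res := pvALoop cs cs.length [] ((cs.length : Int) - 1) false
  let rest := PySem.List.slice cs none (some res.2)
  let r' := if res.1 ≠ [] then (PySem.Chars.strip res.1).reverse else res.1
  (String.ofList r', String.ofList rest)

-- ===== PORT B =====
def parse_lastword_from_url_fc_alt (restofurl_str : String) : String × String :=
  let n : Int := (PySem.Str.len restofurl_str : Int)
  let idx := PySem.Str.rfindFrom restofurl_str "-" 0 (some (n - 1)) + 1
  let e : Int := if PySem.Str.endswith restofurl_str "-" then n - 1 else n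
  (String.ofList (PySem.Chars.strip (PySem.List.slice restofurl_str.toList (some idx) (some e))),
   String.ofList (PySem.List.slice restofurl_str.toList none (some idx)))

-- ===== PRECONDITION & SPEC =====
def Spec_parse_lastword_from_url_fc (restofurl_str : String) (out : String × String) : Prop := out = parse_lastword_from_url_fc_alt restofurl_str
instance (restofurl_str : String) (out : String × String) : Decidable (Spec_parse_lastword_from_url_fc restofurl_str out) := by unfold Spec_parse_lastword_from_url_fc; infer_instance

-- ===== CLAIM (what is proved, stated in full; the proofs are below) =====
def Claim_equal_parse_lastword_from_url_fc : Prop := ∀ (restofurl_str : String), Dom_parse_lastword_from_url_fc restofurl_str → Spec_parse_lastword_from_url_fc restofurl_str (parse_lastword_from_url_fc restofurl_str)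

-- ===== LEMMAS AND PROOFS =====
theorem pv_go_spec (s : List Char) (c : Char) :
    ∀ i : Nat, i < s.length →
      PySem.Chars.rfind.go s [c] i + 1 =
        ((i : Int) + 1) - (((s.take (i+1)).reverse.takeWhile (fun x => x != c)).length : Int) := by
  intro i
  induction i with
  | zero =>
    intro h
    obtain ⟨a, t, rfl⟩ : ∃ a t, s = a :: t := by
      cases s with
      | nil => simp at h
      | cons a t => exact ⟨a, t, rfl⟩
    simp [PySem.Chars.rfind.go, List.isPrefixOf, List.takeWhile]
    by_cases hac : a = c
    · simp [hac]
    · have hb : (a != c) = true := by simp [hac]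
      simp [Ne.symm hac, hb]
  | succ i ih =>
    intro h
    have hi : i < s.length := by omega
    have hdrop : s.drop (i+1) = s[i+1] :: s.drop (i+2) := by
      rw [List.drop_eq_getElem_cons h]
    have htake : s.take (i+1+1) = s.take (i+1) ++ [s[i+1]] := by
      rw [List.take_add_one, List.getElem?_eq_getElem h]; rfl
    have hgo : PySem.Chars.rfind.go s [c] (i+1) =
        if [c].isPrefixOf (s.drop (i+1)) then ((i+1 : Nat) : Int) else PySem.Chars.rfind.go s [c] i := by
      rw [PySem.Chars.rfind.go]
    by_cases hc : s[i+1] = c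
    · have htw : (s.take (i+1+1)).reverse.takeWhile (fun x => x != c) = ([] : List Char) := by
        simp [htake, hc]
      rw [hgo, hdrop, htw]
      simp [List.isPrefixOf, hc]
    · have hb : (s[i+1] != c) = true := by simp [hc]
      have htw : (s.take (i+1+1)).reverse.takeWhile (fun x => x != c)
          = s[i+1] :: (s.take (i+1)).reverse.takeWhile (fun x => x != c) := by
        rw [htake, List.reverse_append]
        simp [List.takeWhile_cons, hb]
      rw [hgo, hdrop, htw]
      have hlen : (((s.take (i+1)).reverse.takeWhile (fun x => x != c)).length : Int) ≤ (i:Int) + 1 := by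
        have h1 := (List.takeWhile_sublist (l := (s.take (i+1)).reverse) (fun x => x != c)).length_le
        have h2 : (s.take (i+1)).length ≤ i + 1 := List.length_take_le _ _
        simp at h1
        omega
      simp [List.isPrefixOf, Ne.symm hc, ih hi]

theorem pv_rfind_eq (xs : List Char) (c : Char) :
    PySem.Chars.rfind xs [c] =
      (xs.length : Int) - 1 - ((xs.reverse.takeWhile (fun x => x != c)).length : Int) := by
  cases hxs : xs with
  | nil => simp [PySem.Chars.rfind, PySem.Chars.rfind.go, List.isPrefixOf]
  | cons a t =>
    rw [← hxs]
    have hlen : xs.length = t.length + 1 := by rw [hxs]; simp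
    have htop : PySem.Chars.rfind xs [c] = PySem.Chars.rfind.go xs [c] t.length := by
      rw [PySem.Chars.rfind, hlen, PySem.Chars.rfind.go]
      have : xs.drop (t.length + 1) = [] := by
        apply List.drop_eq_nil_of_le; omega
      simp [this, List.isPrefixOf]
    have hspec := pv_go_spec xs c t.length (by omega)
    have htk : xs.take (t.length + 1) = xs := by
      apply List.take_of_length_le; omega
    rw [htop]
    rw [htk] at hspec
    omega

theorem pv_rfindFrom_eq (cs : List Char) (c : Char) (h : cs ≠ []) :
    PySem.Chars.rfindFrom cs [c] 0 (some ((cs.length : Int) - 1)) =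
      PySem.Chars.rfind cs.dropLast [c] := by
  have hn : 1 ≤ cs.length := List.length_pos_of_ne_nil h
  have htk : List.take (cs.length - 1) cs = cs.dropLast := List.dropLast_eq_take.symm
  rw [PySem.Chars.rfindFrom]
  have h1 : ¬ ((cs.length : Int) < (cs.length : Int) - 1) := by omega
  have h2 : ¬ ((cs.length : Int) - 1 < 0) := by omega
  have h4 : ¬ ((0:Int) < 0) := by omega
  have ht : ((cs.length : Int) - 1).toNat = cs.length - 1 := by omega
  have h5 : ¬ ((cs.length : Int) - 1 < (0:Int)) := h2
  simp only [h1, if_false, h2, h4, h5, ht, if_neg, List.drop_zero, Int.toNat_zero, htk]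
  split <;> simp_all

theorem pv_rstrip_cons (x : Char) (t : List Char) :
    PySem.Chars.rstrip (x :: t) =
      if PySem.Chars.isspace x = true ∧ PySem.Chars.rstrip t = [] then []
      else x :: PySem.Chars.rstrip t := by
  simp only [PySem.Chars.rstrip, List.reverse_cons]
  rw [List.dropWhile_append]
  by_cases hnil : List.dropWhile PySem.Chars.isspace t.reverse = []
  · simp [hnil, List.dropWhile]
    by_cases hx : PySem.Chars.isspace x = true <;> simp [hx]
  · simp [hnil]

theorem pv_rstrip_eq_nil_iff (t : List Char) :
    PySem.Chars.rstrip t = [] ↔ ∀ x ∈ t, PySem.Chars.isspace x = true := by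
  simp [PySem.Chars.rstrip, List.dropWhile_eq_nil_iff]

theorem pv_lstrip_rstrip_comm (l : List Char) :
    PySem.Chars.lstrip (PySem.Chars.rstrip l) = PySem.Chars.rstrip (PySem.Chars.lstrip l) := by
  induction l with
  | nil => rfl
  | cons x t ih =>
    by_cases hx : PySem.Chars.isspace x = true
    · rw [pv_rstrip_cons]
      by_cases hnil : PySem.Chars.rstrip t = []
      · have hall := (pv_rstrip_eq_nil_iff t).mp hnil
        have hdw : List.dropWhile PySem.Chars.isspace t = [] := List.dropWhile_eq_nil_iff.mpr hall
        simp [hx, hnil, PySem.Chars.lstrip, hdw]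
        rfl
      · simp only [hx, hnil, and_false, if_false, if_neg]
        simp [PySem.Chars.lstrip, List.dropWhile_cons, hx] at ih ⊢
        exact ih
    · have hrt : PySem.Chars.rstrip (x :: t) = x :: PySem.Chars.rstrip t := by
        rw [pv_rstrip_cons]; simp [hx]
      rw [hrt]
      simp [PySem.Chars.lstrip, List.dropWhile_cons, hx]
      exact hrt.symm

theorem pv_strip_reverse (l : List Char) :
    PySem.Chars.strip l.reverse = (PySem.Chars.strip l).reverse := by
  have h1 : PySem.Chars.lstrip l.reverse = (PySem.Chars.rstrip l).reverse := by
    simp [PySem.Chars.lstrip, PySem.Chars.rstrip]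
  rw [PySem.Chars.strip, h1, PySem.Chars.rstrip, List.reverse_reverse, PySem.Chars.strip]
  rw [show List.dropWhile PySem.Chars.isspace (PySem.Chars.rstrip l)
        = PySem.Chars.lstrip (PySem.Chars.rstrip l) from rfl, pv_lstrip_rstrip_comm]

theorem pv_strip_space_cons (t : List Char) :
    PySem.Chars.strip (' ' :: t) = PySem.Chars.strip t := by
  simp [PySem.Chars.strip, PySem.Chars.lstrip, List.dropWhile_cons, PySem.Chars.isspace]

theorem pv_aLoop_true (s : List Char) :
    ∀ (k : Nat), k ≤ s.length → ∀ (r : List Char) (li : Int),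
      pvALoop s k r li true =
        (r ++ (s.take k).reverse.takeWhile (fun x => x != '-'),
         if ((s.take k).reverse.takeWhile (fun x => x != '-')).length = 0 then li
         else (k : Int) - ((s.take k).reverse.takeWhile (fun x => x != '-')).length) := by
  intro k
  induction k with
  | zero => intro _ r li; simp [pvALoop]
  | succ k ih =>
    intro hk r li
    have hks : k < s.length := by omega
    have hget : (PySem.List.pyGet? s ((k : Nat) : Int)).getD ' ' = s[k] := by
      simp [PySem.List.pyGet?_natCast, List.getElem?_eq_getElem hks]
    have htake : s.take (k+1) = s.take k ++ [s[k]] := by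
      rw [List.take_add_one, List.getElem?_eq_getElem hks]; rfl
    rw [pvALoop]
    simp only [hget, if_true]
    by_cases hc : s[k] = '-'
    · have htw : (s.take (k+1)).reverse.takeWhile (fun x => x != '-') = ([] : List Char) := by
        rw [htake, List.reverse_append]
        simp [hc]
      rw [htw]
      simp [hc]
    · have hb : (s[k] != '-') = true := by simp [hc]
      have htw : (s.take (k+1)).reverse.takeWhile (fun x => x != '-')
          = s[k] :: (s.take k).reverse.takeWhile (fun x => x != '-') := by
        rw [htake, List.reverse_append]
        simp [hb]
      rw [htw]
      simp only [hc, if_false]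
      rw [ih (by omega)]
      have hlen : ((s.take k).reverse.takeWhile (fun x => x != '-')).length ≤ k := by
        have h1 := (List.takeWhile_sublist (l := (s.take k).reverse) (fun x => x != '-')).length_le
        have h2 : (s.take k).length ≤ k := List.length_take_le _ _
        simp at h1
        omega
      refine Prod.ext ?_ ?_
      · simp
      · simp only [List.length_cons]
        rw [if_neg (by omega : ¬ (List.takeWhile (fun x => x != '-') (List.take k s).reverse).length + 1 = 0)]
        split <;> push_cast <;> omega

theorem pv_suffix_single (ys : List Char) (h c : Char) :
    PySem.Chars.endswith (ys ++ [h]) [c] = true ↔ h = c := by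
  simp [PySem.Chars.endswith, List.isSuffixOf_iff_suffix]
  constructor
  · rintro ⟨t, ht⟩
    have := congrArg List.getLast? ht
    simp [List.getLast?_concat] at this
    exact this.symm
  · rintro rfl
    exact ⟨ys, rfl⟩

theorem pv_drop_tail (ys : List Char) (m : Nat)
    (hm : m = (ys.reverse.takeWhile (fun x => x != '-')).length) :
    ys.drop (ys.length - m) = (ys.reverse.takeWhile (fun x => x != '-')).reverse := by
  obtain ⟨A, B, hys2, hB⟩ :
      ∃ A B, ys = A ++ B ∧ B = (ys.reverse.takeWhile (fun x => x != '-')).reverse := by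
    refine ⟨(ys.reverse.dropWhile (fun x => x != '-')).reverse,
      (ys.reverse.takeWhile (fun x => x != '-')).reverse, ?_, rfl⟩
    conv_lhs => rw [← List.reverse_reverse ys, ← List.takeWhile_append_dropWhile
      (p := fun x => x != '-') (l := ys.reverse)]
    rw [List.reverse_append]
  have hBlen : B.length = m := by rw [hB, List.length_reverse, hm]
  rw [← hB]
  conv_lhs => rw [hys2]
  have hcnt : (A ++ B).length - m = A.length := by simp [hBlen]
  rw [hcnt, List.drop_left]

theorem pv_A_loop_eval (ys : List Char) (h : Char) (li0 : Int) :
    pvALoop (ys ++ [h]) (ys.length + 1) [] li0 false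
      = ((if h = '-' then ' ' else h) :: ys.reverse.takeWhile (fun x => x != '-'),
         (ys.length : Int) - ((ys.reverse.takeWhile (fun x => x != '-')).length : Int)) := by
  have hget : (PySem.List.pyGet? (ys ++ [h]) ((ys.length : Nat) : Int)).getD ' ' = h := by
    simp [PySem.List.pyGet?_natCast]
  rw [pvALoop]
  simp only [hget, Bool.false_eq_true, if_false, List.nil_append]
  rw [pv_aLoop_true (ys ++ [h]) ys.length (by simp) _ _]
  rw [List.take_left]
  refine Prod.ext ?_ ?_
  · simp
  · simp only []
    split
    · next h0 => rw [h0]; simp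
    · rfl

theorem pv_B_idx (ys : List Char) (h : Char) :
    PySem.Chars.rfindFrom (ys ++ [h]) ['-'] 0 (some (((ys.length + 1 : Nat) : Int) - 1)) + 1
      = (ys.length : Int) - ((ys.reverse.takeWhile (fun x => x != '-')).length : Int) := by
  rw [show (((ys.length + 1 : Nat) : Int) - 1) = ((ys ++ [h]).length : Int) - 1 from by simp]
  rw [pv_rfindFrom_eq _ _ (by simp)]
  rw [show (ys ++ [h]).dropLast = ys from by simp]
  rw [pv_rfind_eq]
  have hmk : (ys.reverse.takeWhile (fun x => x != '-')).length ≤ ys.length := by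
    have h1 := (List.takeWhile_sublist (l := ys.reverse) (fun x => x != '-')).length_le
    simpa using h1
  omega

theorem pv_B_slice (ys : List Char) (h : Char) (e : Int)
    (he : e = if h = '-' then (ys.length : Int) else (ys.length : Int) + 1) :
    PySem.List.slice (ys ++ [h])
        (some ((ys.length : Int) - ((ys.reverse.takeWhile (fun x => x != '-')).length : Int)))
        (some e)
      = (ys.reverse.takeWhile (fun x => x != '-')).reverse ++ (if h = '-' then [] else [h]) := by
  have hmk : (ys.reverse.takeWhile (fun x => x != '-')).length ≤ ys.length := by
    have h1 := (List.takeWhile_sublist (l := ys.reverse) (fun x => x != '-')).length_le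
    simpa using h1
  set m := (ys.reverse.takeWhile (fun x => x != '-')).length with hm
  have h0e : 0 ≤ e := by rw [he]; split <;> omega
  rw [PySem.List.slice_toNat _ (by omega) h0e]
  have ht1 : ((ys.length : Int) - (m : Int)).toNat = ys.length - m := by omega
  rw [ht1]
  have hdrop : (ys ++ [h]).drop (ys.length - m) =
      (ys.reverse.takeWhile (fun x => x != '-')).reverse ++ [h] := by
    rw [List.drop_append_of_le_length (by omega), pv_drop_tail ys m hm]
  rw [hdrop]
  have hrevlen : (ys.reverse.takeWhile (fun x => x != '-')).reverse.length = m := by simp [hm]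
  by_cases hh : h = '-'
  · have he' : e.toNat - (ys.length - m) = m := by rw [he]; simp [hh]; omega
    rw [he']
    simp [List.take_left' hrevlen, hh]
  · have he' : e.toNat - (ys.length - m) = m + 1 := by rw [he]; simp [hh]; omega
    rw [he']
    rw [List.take_of_length_le (by simp [hrevlen])]
    simp [hh]

theorem pv_main (s : String) :
    parse_lastword_from_url_fc s = parse_lastword_from_url_fc_alt s := by
  unfold parse_lastword_from_url_fc parse_lastword_from_url_fc_alt
  rcases List.eq_nil_or_concat s.toList with hcs | ⟨ys, h, hcs⟩
  · simp only [hcs]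
    simp [pvALoop, PySem.Str.len, PySem.Str.rfindFrom, PySem.Str.endswith, hcs,
      PySem.Chars.rfindFrom, PySem.Chars.endswith, PySem.Chars.rfind, PySem.Chars.rfind.go,
      PySem.List.slice, PySem.Chars.strip, PySem.Chars.lstrip, PySem.Chars.rstrip,
      List.isPrefixOf, List.isSuffixOf]
  · have hdash : ("-" : String).toList = ['-'] := rfl
    rw [List.concat_eq_append] at hcs
    simp only [PySem.Str.len, PySem.Str.rfindFrom, PySem.Str.endswith, hdash, hcs,
      PySem.Chars.len_eq]
    rw [show (ys ++ [h]).length = ys.length + 1 from by simp]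
    rw [pv_A_loop_eval, pv_B_idx]
    set tw := ys.reverse.takeWhile (fun x => x != '-') with htw
    set m := tw.length with hm
    have hword :
        (if ((if h = '-' then ' ' else h) :: tw) ≠ [] then
            (PySem.Chars.strip ((if h = '-' then ' ' else h) :: tw)).reverse
          else ((if h = '-' then ' ' else h) :: tw))
        = PySem.Chars.strip (PySem.List.slice (ys ++ [h])
            (some ((ys.length : Int) - (m : Int)))
            (some (if PySem.Chars.endswith (ys ++ [h]) ['-'] = true
                   then ((ys.length + 1 : Nat) : Int) - 1 else ((ys.length + 1 : Nat) : Int)))) := by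
      have hee : (if PySem.Chars.endswith (ys ++ [h]) ['-'] = true
                   then ((ys.length + 1 : Nat) : Int) - 1 else ((ys.length + 1 : Nat) : Int))
          = if h = '-' then (ys.length : Int) else (ys.length : Int) + 1 := by
        by_cases hh : h = '-'
        · rw [if_pos ((pv_suffix_single ys h '-').mpr hh), if_pos hh]
          push_cast; ring
        · rw [if_neg (by
            intro hc
            exact hh ((pv_suffix_single ys h '-').mp hc)), if_neg hh]
          push_cast; ring
      rw [hee, pv_B_slice ys h _ rfl]
      by_cases hh : h = '-'
      · subst hh
        rw [if_pos (by simp), if_pos rfl, if_pos rfl, List.append_nil]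
        rw [pv_strip_space_cons, pv_strip_reverse]
      · rw [if_pos (by simp), if_neg hh, if_neg hh]
        rw [show (tw.reverse ++ [h]) = (h :: tw).reverse from by simp]
        rw [pv_strip_reverse]
    rw [hword]

-- ===== VERDICT (by name: the statement is the Claim_ definition above) =====
theorem parse_lastword_from_url_fc_spec : Claim_equal_parse_lastword_from_url_fc := by
  intro s _
  unfold Spec_parse_lastword_from_url_fc
  exact pv_main s
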